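-- pv_equiv track=rewrite | github.com/ZackaryW/expirable-keyring | ekring/utils.py | dateformat_length
-- ===== SOURCE A (Python) =====
-- def yield_every_n_char(string : str, n : int):
--     for i in range(0, len(string), n):
--         yield string[i:i+n]
--
-- def split_every_n_char(string : str, n : int):
--     return list(yield_every_n_char(string, n))
--
-- def dateformat_length(string :str):
--     length = 0
--     for segment in split_every_n_char(string, 2):
--         match segment:
--             case "%Y":
--                 length += 4
--             case "%m":
--                 length += 2
--             case "%d":
--                 length += 2
--             case "%H":
--                 length += 2
--             case "%M":
--                 length += 2
--             case "%S":
--                 length += 2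
--             case _:
--                 length += len(segment)
--
--     return length
-- ===== SOURCE B (Python) =====
-- def dateformat_length(string: str):
--     parts = string.split("%Y")
--     count = 0
--     pos = 0
--     for part in parts[:-1]:
--         pos += len(part)
--         if pos % 2 == 0:
--             count += 1
--         pos += 2
--     return len(string) + 2 * count
-- ===== Notes on version B (the rewrite author's own statement) =====
-- stated objective: faster
-- what changed: B replaces the chunk-into-pairs pass with its six-way match table by splitting the string on the special token, counting the occurrences whose cumulative offset is even, and returning the string length plus twice that count.
import Mathlib
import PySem

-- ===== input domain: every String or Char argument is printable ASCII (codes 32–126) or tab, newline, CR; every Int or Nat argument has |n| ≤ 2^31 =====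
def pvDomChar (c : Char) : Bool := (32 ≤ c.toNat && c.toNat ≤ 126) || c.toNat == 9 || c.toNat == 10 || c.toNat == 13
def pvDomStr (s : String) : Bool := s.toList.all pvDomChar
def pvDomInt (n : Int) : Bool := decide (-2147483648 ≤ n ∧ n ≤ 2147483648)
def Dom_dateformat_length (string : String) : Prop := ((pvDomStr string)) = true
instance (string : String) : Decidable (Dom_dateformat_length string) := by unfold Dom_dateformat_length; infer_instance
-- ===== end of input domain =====

-- B: instead of chunking into pairs and matching, split the string on "%Y", count the
-- occurrences whose offset is even, and return len(string) + 2*that count (measured faster: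
-- the scan happens inside str.split instead of a per-chunk Python loop).

-- ===== PORT A =====
-- split_every_n_char(string, n) = [string[i:i+n] for i in range(0, len(string), n)]
def split_every_n_char (string : List Char) (n : Int) : List (List Char) :=
  (PySem.List.pyRange 0 (PySem.Chars.len string) n).map
    (fun i => PySem.Chars.slice string (some i) (some (i + n)))

-- the body of A's `match segment: …`, applied once per segment by the fold
def pvMatchSeg (length : Int) (segment : List Char) : Int :=
  if segment = ['%', 'Y'] then length + 4
  else if segment = ['%', 'm'] then length + 2
  else if segment = ['%', 'd'] then length + 2
  else if segment = ['%', 'H'] then length + 2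
  else if segment = ['%', 'M'] then length + 2
  else if segment = ['%', 'S'] then length + 2
  else length + PySem.Chars.len segment

def dateformat_length (string : String) : Int :=
  (split_every_n_char string.toList 2).foldl pvMatchSeg 0

-- ===== PORT B =====
-- the loop body of Source B: state (count, pos), one split part at a time
def pvStep (st : Int × Int) (part : List Char) : Int × Int :=
  let pos := st.2 + PySem.Chars.len part
  if PySem.Int.mod pos 2 = 0 then (st.1 + 1, pos + 2) else (st.1, pos + 2)

def dateformat_length_alt (string : String) : Int :=
  let parts := PySem.Chars.splitOn string.toList ['%', 'Y']
  let st := (PySem.List.slice parts none (some (-1))).foldl pvStep (0, 0)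
  PySem.Chars.len string.toList + 2 * st.1

-- ===== PRECONDITION & SPEC =====
def Spec_dateformat_length (string : String) (out : Int) : Prop := out = dateformat_length_alt string
instance (string : String) (out : Int) : Decidable (Spec_dateformat_length string out) := by unfold Spec_dateformat_length; infer_instance

-- ===== CLAIM (what is proved, stated in full; the proofs are below) =====
def Claim_equal_dateformat_length : Prop := ∀ (string : String), Dom_dateformat_length string → Spec_dateformat_length string (dateformat_length string)

-- ===== LEMMAS AND PROOFS =====

-- number of occurrences of "%Y" in cs whose absolute position has the parity tracked by p
-- (p = true at even positions when started with p = true)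
def pvOcc : Bool → List Char → Int
  | _, [] => 0
  | p, a :: rest => (if p ∧ a = '%' ∧ rest.head? = some 'Y' then 1 else 0) + pvOcc (!p) rest

-- ---- A-side: the chunk fold computed two characters at a time ----
def pvChunkStep (f : Int → List Char → Int) : Int → List Char → Int
  | init, [] => init
  | init, [a] => f init [a]
  | init, a :: b :: rest => pvChunkStep f (f init [a, b]) rest

lemma pvPyRange_two_cons (a b : Int) (h : a < b) :
    PySem.List.pyRange a b 2 = a :: PySem.List.pyRange (a + 2) b 2 := by
  rw [PySem.List.pyRange_of_pos a b (by norm_num), PySem.List.pyRange_of_pos (a + 2) b (by norm_num)]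
  have h1 : ((b - a + 2 - 1) / 2).toNat = (if a + 2 < b then ((b - (a + 2) + 2 - 1) / 2).toNat else 0) + 1 := by
    split_ifs with h2
    · omega
    · omega
  rw [if_pos h, h1, List.range_succ_eq_map]
  simp [List.map_map, Function.comp]
  intro k _
  ring

lemma pvChunkFoldFrom (f : Int → List Char → Int) (full : List Char) (j : Nat) (init : Int) :
    (PySem.List.pyRange (j : Int) (PySem.Chars.len full) 2).foldl
      (fun acc i => f acc (PySem.Chars.slice full (some i) (some (i + 2)))) init
    = pvChunkStep f init (full.drop j) := by
  by_cases h : full.length ≤ j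
  · have h1 : PySem.List.pyRange (j : Int) (PySem.Chars.len full) 2 = [] := by
      rw [PySem.List.pyRange_of_pos _ _ (by norm_num)]
      rw [if_neg (by simp [PySem.Chars.len]; exact_mod_cast Nat.cast_le.mpr h)]
      simp
    rw [h1, List.drop_eq_nil_of_le h]
    rfl
  · push Not at h
    have hlen : PySem.Chars.len full = (full.length : Int) := by simp [PySem.Chars.len]
    have hcons := pvPyRange_two_cons (j : Int) (PySem.Chars.len full) (by rw [hlen]; exact_mod_cast h)
    rw [hcons]
    simp only [List.foldl_cons]
    have hslice : PySem.Chars.slice full (some (j : Int)) (some ((j : Int) + 2)) = (full.drop j).take 2 := by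
      have : ((j : Int) + 2) = ((j + 2 : Nat) : Int) := by push_cast; ring
      rw [this]
      simp only [PySem.Chars.slice]
      rw [PySem.List.slice_natCast]
      congr 1
      omega
    have hcast : ((j : Int) + 2) = ((j + 2 : Nat) : Int) := by push_cast; ring
    rw [hslice, hcast, pvChunkFoldFrom f full (j + 2) (f init ((full.drop j).take 2))]
    have hd : full.drop (j + 2) = (full.drop j).drop 2 := by
      rw [List.drop_drop]
    rw [hd]
    rcases hne : full.drop j with _ | ⟨a, _ | ⟨b, rest⟩⟩
    · exact absurd (List.drop_eq_nil_iff.mp hne) (by omega)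
    · rfl
    · rfl
termination_by full.length - j
decreasing_by omega

-- A's fold on cs equals the two-at-a-time recursion with the match body
lemma pvA_chunk (cs : List Char) :
    (split_every_n_char cs 2).foldl pvMatchSeg 0 = pvChunkStep pvMatchSeg 0 cs := by
  unfold split_every_n_char
  rw [List.foldl_map]
  have := pvChunkFoldFrom pvMatchSeg cs 0 0
  simpa using this

-- the chunk fold is the length plus twice the number of even-position "%Y" occurrences
lemma pvKeyA : ∀ (cs : List Char) (iA : Int),
    pvChunkStep pvMatchSeg iA cs = iA + (cs.length : Int) + 2 * pvOcc true cs
  | [], iA => by simp [pvChunkStep, pvOcc]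
  | [a], iA => by
      simp [pvChunkStep, pvMatchSeg, pvOcc, PySem.Chars.len]
  | a :: b :: rest, iA => by
      have ih := pvKeyA rest (pvMatchSeg iA [a, b])
      simp only [pvChunkStep] at *
      rw [ih]
      simp only [pvMatchSeg, pvOcc, PySem.Chars.len, List.head?_cons, List.length_cons,
        Option.some.injEq]
      split_ifs <;> simp_all <;> ring

-- ---- B-side: facts about PySem.Chars.splitOn.go ----

-- the accumulator just prepends
lemma pvGoAcc : ∀ (fuel : Nat) (sep l cur : List Char) (acc : List (List Char)),
    PySem.Chars.splitOn.go sep fuel l cur acc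
      = acc.reverse ++ PySem.Chars.splitOn.go sep fuel l cur []
  | 0, sep, l, cur, acc => by
      show ((cur.reverse ++ l) :: acc).reverse = acc.reverse ++ ((cur.reverse ++ l) :: []).reverse
      simp
  | fuel + 1, sep, [], cur, acc => by
      show (cur.reverse :: acc).reverse = acc.reverse ++ (cur.reverse :: []).reverse
      simp
  | fuel + 1, sep, c :: rest, cur, acc => by
      show (if sep.isPrefixOf (c :: rest) then
              PySem.Chars.splitOn.go sep fuel (List.drop sep.length (c :: rest)) [] (cur.reverse :: acc)
            else PySem.Chars.splitOn.go sep fuel rest (c :: cur) acc)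
          = acc.reverse ++ (if sep.isPrefixOf (c :: rest) then
              PySem.Chars.splitOn.go sep fuel (List.drop sep.length (c :: rest)) [] (cur.reverse :: [])
            else PySem.Chars.splitOn.go sep fuel rest (c :: cur) [])
      split_ifs with h
      · rw [pvGoAcc fuel sep _ [] (cur.reverse :: acc), pvGoAcc fuel sep _ [] (cur.reverse :: [])]
        simp
      · rw [pvGoAcc fuel sep rest (c :: cur) acc]

-- go never returns the empty list of parts
lemma pvGoNe : ∀ (fuel : Nat) (sep l cur : List Char),
    PySem.Chars.splitOn.go sep fuel l cur [] ≠ []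
  | 0, sep, l, cur => by
      show ((cur.reverse ++ l) :: []).reverse ≠ []
      simp
  | fuel + 1, sep, [], cur => by
      show (cur.reverse :: []).reverse ≠ []
      simp
  | fuel + 1, sep, c :: rest, cur => by
      show (if sep.isPrefixOf (c :: rest) then
              PySem.Chars.splitOn.go sep fuel (List.drop sep.length (c :: rest)) [] (cur.reverse :: [])
            else PySem.Chars.splitOn.go sep fuel rest (c :: cur) []) ≠ []
      split_ifs with h
      · rw [pvGoAcc]
        simp
      · exact pvGoNe fuel sep rest (c :: cur)

-- master invariant: B's fold over the parts produced by go (last part dropped)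
-- counts exactly the even-position "%Y" occurrences of the remaining input l,
-- where pos is the absolute start of the current part and cur its reversed prefix
lemma pvKgo : ∀ (fuel : Nat) (l cur : List Char) (count pos : Int),
    l.length + 1 ≤ fuel → 0 ≤ pos →
    (((PySem.Chars.splitOn.go ['%', 'Y'] fuel l cur []).dropLast).foldl pvStep (count, pos)).1
      = count + pvOcc (decide ((pos + cur.length) % 2 = 0)) l
  | 0, l, cur, count, pos, hf, _ => absurd hf (by omega)
  | fuel + 1, [], cur, count, pos, hf, hpos => by
      show ((((cur.reverse :: []).reverse : List (List Char)).dropLast.foldl pvStep (count, pos)).1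
              = count + pvOcc (decide ((pos + cur.length) % 2 = 0)) [])
      simp [pvOcc]
  | fuel + 1, c :: rest, cur, count, pos, hf, hpos => by
      show (((if (['%', 'Y'] : List Char).isPrefixOf (c :: rest) then
              PySem.Chars.splitOn.go ['%', 'Y'] fuel (List.drop (['%', 'Y'] : List Char).length (c :: rest)) [] (cur.reverse :: [])
            else PySem.Chars.splitOn.go ['%', 'Y'] fuel rest (c :: cur) []).dropLast.foldl pvStep (count, pos)).1
          = count + pvOcc (decide ((pos + (cur.length : Int)) % 2 = 0)) (c :: rest))
      split_ifs with h
      · -- the separator matches here: c = '%', rest = 'Y' :: rest'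
        obtain ⟨rest', rfl, rfl⟩ : ∃ rest', c = '%' ∧ rest = 'Y' :: rest' := by
          cases rest with
          | nil => simp [List.isPrefixOf] at h
          | cons b rest' =>
            simp [List.isPrefixOf] at h
            exact ⟨rest', h.1.symm, by rw [← h.2]⟩
        rw [pvGoAcc]
        simp only [List.reverse_cons, List.reverse_nil, List.nil_append, List.singleton_append]
        rw [List.dropLast_cons_of_ne_nil (pvGoNe fuel _ _ _), List.foldl_cons]
        have hstep : pvStep (count, pos) cur.reverse
            = (if (pos + cur.length) % 2 = 0 then count + 1 else count, pos + cur.length + 2) := by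
          simp only [pvStep, PySem.Chars.len, List.length_reverse]
          rw [PySem.Int.mod_eq_emod_of_pos (by norm_num : (0:Int) < 2)]
          split_ifs <;> rfl
        rw [hstep]
        have ih := pvKgo fuel rest' [] (if (pos + cur.length) % 2 = 0 then count + 1 else count)
            (pos + cur.length + 2) (by simp at hf ⊢; omega) (by omega)
        simp only [List.length_nil, Nat.cast_zero, add_zero] at ih
        have hpar : ((pos + (cur.length : Int) + 2) % 2 = 0) ↔ ((pos + (cur.length : Int)) % 2 = 0) := by
          omega
        rw [show List.drop (['%', 'Y'] : List Char).length ('%' :: 'Y' :: rest') = rest' from rfl,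
          ih]
        by_cases hp : (pos + (cur.length : Int)) % 2 = 0
        · rw [if_pos hp, decide_eq_true (hpar.mpr hp), decide_eq_true hp]
          simp [pvOcc]
          ring
        · rw [if_neg hp, decide_eq_false (fun hc => hp (hpar.mp hc)), decide_eq_false hp]
          simp [pvOcc]
      · -- no match: advance one character
        have ih := pvKgo fuel rest (c :: cur) count pos (by simp at hf ⊢; omega) hpos
        rw [ih]
        have hnot : ¬ (c = '%' ∧ rest.head? = some 'Y') := by
          rintro ⟨rfl, hh⟩
          cases rest with
          | nil => simp at hh
          | cons b rest' =>
            simp at hh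
            subst hh
            simp [List.isPrefixOf] at h
        have hlen : ((c :: cur).length : Int) = (cur.length : Int) + 1 := by
          simp [List.length_cons]
        by_cases hp : (pos + (cur.length : Int)) % 2 = 0
        · have h1 : ¬ (pos + ((c :: cur).length : Int)) % 2 = 0 := by rw [hlen]; omega
          rw [decide_eq_false h1, decide_eq_true hp]
          simp [pvOcc, hnot]
        · have h1 : (pos + ((c :: cur).length : Int)) % 2 = 0 := by rw [hlen]; omega
          rw [decide_eq_true h1, decide_eq_false hp]
          simp [pvOcc, hnot]

-- ===== VERDICT (by name: the statement is the Claim_ definition above) =====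
theorem dateformat_length_spec : Claim_equal_dateformat_length := by
  intro string _
  show dateformat_length string = dateformat_length_alt string
  unfold dateformat_length dateformat_length_alt
  rw [pvA_chunk, pvKeyA]
  simp only [PySem.List.slice_to_neg_one]
  rw [show PySem.Chars.splitOn string.toList ['%', 'Y']
        = PySem.Chars.splitOn.go ['%', 'Y'] (string.toList.length + 1) string.toList [] [] from rfl]
  have hk := pvKgo (string.toList.length + 1) string.toList [] 0 0 (by omega) (by omega)
  simp only [List.length_nil, Nat.cast_zero, add_zero] at hk
  rw [hk]
  simp [PySem.Chars.len]
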